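-- pv_equiv track=rewrite | github.com/MishanyaNoobasik/YaDaun1 | cw1.py | whitespace_number
-- ===== SOURCE A (Python) =====
-- def whitespace_number(n):
--     z = ''
--     if n > 0:
--         z = ' '
--     elif n < 0:
--         z = '\t'
--     else:
--         pass
--     r = ''
--     a = abs(n)
--     if a != 0:
--         while a > 0:
--             r = str(a % 2) + r
--             a //= 2
--         r1 = r.replace('0', ' ')
--         r2 = r1.replace('1', '\t')
--         res = z + r2 + '\n'
--     else:
--         res = ' \n'
--     return res
-- ===== SOURCE B (Python) =====
-- def whitespace_number(n):
--     m = abs(n)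
--     sign = ' ' if n > 0 else '\t' if n < 0 else ''
--     width = max(m.bit_length(), 1)
--     body = ''.join('\t' if (m >> i) & 1 else ' ' for i in range(width - 1, -1, -1))
--     return sign + body + '\n'
-- ===== Notes on version B (the rewrite author's own statement) =====
-- stated objective: alternative
-- what changed: Replaces A's LSB-first repeated-division loop that prepends digit strings and then runs two replace() passes with an MSB-first bit scan: bit_length fixes the width and each output character is emitted directly in final order by shifting and masking, with no digit string, no reversal-by-prepend and no replace passes.
import Mathlib
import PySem

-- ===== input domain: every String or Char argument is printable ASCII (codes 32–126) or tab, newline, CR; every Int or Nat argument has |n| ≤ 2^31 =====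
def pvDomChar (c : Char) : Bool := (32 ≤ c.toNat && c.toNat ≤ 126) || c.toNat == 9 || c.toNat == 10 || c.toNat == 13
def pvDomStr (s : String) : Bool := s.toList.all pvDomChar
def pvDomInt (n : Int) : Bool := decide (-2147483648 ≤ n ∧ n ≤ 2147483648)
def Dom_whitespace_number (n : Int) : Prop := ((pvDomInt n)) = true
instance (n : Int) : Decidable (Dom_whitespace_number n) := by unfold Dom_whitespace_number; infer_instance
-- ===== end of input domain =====

-- B replaces A's LSB-first division loop (digit-string prepends + two replace passes) with an
-- MSB-first bit scan via bit_length and shift/mask, emitting each character directly in final order;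
-- return-value equivalence is proved for all Int inputs.


-- ===== PORT A =====
-- the 'while a > 0: r = str(a % 2) + r; a //= 2' loop
def whitespaceLoopA (a : Int) (r : String) : String :=
  if 0 < a then
    whitespaceLoopA (PySem.Int.floordiv a 2) (PySem.Int.toStr (PySem.Int.mod a 2) ++ r)
  else r
termination_by a.toNat
decreasing_by
  simp only [PySem.Int.floordiv]
  rw [Int.fdiv_eq_ediv_of_nonneg _ (by omega : (0:Int) ≤ 2)]
  omega

def whitespace_number (n : Int) : String :=
  let z : String := if n > 0 then " " else if n < 0 then "\t" else ""
  let a : Int := |n|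
  if a ≠ 0 then
    let r := whitespaceLoopA a ""
    let r1 := PySem.Str.replace r "0" " "
    let r2 := PySem.Str.replace r1 "1" "\t"
    z ++ r2 ++ "\n"
  else " \n"

-- ===== PORT B =====
-- m.bit_length(): number of binary digits of m, 0 for m = 0 (exact for the Python builtin)
def pyBitLength (m : Nat) : Nat :=
  if m = 0 then 0 else pyBitLength (m / 2) + 1
termination_by m
decreasing_by exact Nat.div_lt_self (by omega) (by omega)

def whitespace_number_alt (n : Int) : String :=
  let m : Nat := n.natAbs
  let sign : String := if n > 0 then " " else if n < 0 then "\t" else ""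
  let width : Nat := max (pyBitLength m) 1
  let body : String := String.ofList ((PySem.List.pyRange ((width : Int) - 1) (-1) (-1)).map
      (fun i => if (m >>> i.toNat) % 2 = 1 then '\t' else ' '))
  sign ++ body ++ "\n"

-- ===== PRECONDITION & SPEC =====
def Spec_whitespace_number (n : Int) (out : String) : Prop := out = whitespace_number_alt n
instance (n : Int) (out : String) : Decidable (Spec_whitespace_number n out) := by unfold Spec_whitespace_number; infer_instance

-- ===== CLAIM (what is proved, stated in full; the proofs are below) =====
def Claim_equal_whitespace_number : Prop := ∀ (n : Int), Dom_whitespace_number n → Spec_whitespace_number n (whitespace_number n)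

-- ===== LEMMAS AND PROOFS =====

-- the '0'/'1' digit list A's loop builds
def binChars (m : Nat) : List Char :=
  if h : m < 2 then [Char.ofNat (48 + m)]
  else binChars (m / 2) ++ [Char.ofNat (48 + m % 2)]

-- the whitespace/tab digit list both programs end up producing
def wsBits (m : Nat) : List Char :=
  if m < 2 then [if m = 1 then '\t' else ' ']
  else wsBits (m / 2) ++ [if m % 2 = 1 then '\t' else ' ']

-- replace with a single-char pattern and single-char replacement is a pointwise map
theorem replace_go_single (o nw : Char) (l acc : List Char) (fuel : Nat) (h : l.length ≤ fuel) :
    PySem.Chars.replace.go [o] [nw] fuel l acc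
      = acc.reverse ++ l.map (fun c => if c = o then nw else c) := by
  induction l generalizing fuel acc with
  | nil => cases fuel <;> simp [PySem.Chars.replace.go]
  | cons c t ih =>
    cases fuel with
    | zero => simp at h
    | succ fuel =>
      simp only [List.length_cons, Nat.succ_le_succ_iff] at h
      by_cases hc : c = o
      · subst hc
        simp [PySem.Chars.replace.go, List.isPrefixOf, ih _ _ h]
      · have hpre : [o].isPrefixOf (c :: t) = false := by
          simp [List.isPrefixOf]
          intro hco; exact hc hco.symm
        simp [PySem.Chars.replace.go, hpre, hc, ih _ _ h]

theorem replace_single (o nw : Char) (l : List Char) :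
    PySem.Chars.replace l [o] [nw] = l.map (fun c => if c = o then nw else c) := by
  simp [PySem.Chars.replace, replace_go_single o nw l [] l.length le_rfl]

-- A's loop computes the binary digits of a (as '0'/'1' chars) in front of r
theorem whitespaceLoopA_eq (a : Int) (ha : 0 < a) (r : String) :
    (whitespaceLoopA a r).toList = binChars a.natAbs ++ r.toList := by
  generalize hk : a.toNat = k
  induction k using Nat.strong_induction_on generalizing a r with
  | _ k ih =>
    rw [whitespaceLoopA.eq_def, if_pos ha]
    have hd : PySem.Int.floordiv a 2 = ((a.natAbs / 2 : Nat) : Int) := by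
      simp only [PySem.Int.floordiv]
      rw [Int.fdiv_eq_ediv_of_nonneg _ (by omega : (0:Int) ≤ 2)]
      omega
    have hm : PySem.Int.mod a 2 = ((a.natAbs % 2 : Nat) : Int) := by
      simp only [PySem.Int.mod]
      rw [Int.fmod_eq_emod]
      omega
    have hdig : (PySem.Int.toStr (PySem.Int.mod a 2)).toList = [Char.ofNat (48 + a.natAbs % 2)] := by
      rw [hm]
      have h2 : a.natAbs % 2 < 2 := Nat.mod_lt _ (by norm_num)
      interval_cases hq : (a.natAbs % 2) <;> simp [PySem.Int.toStr, PySem.Int.toChars] <;> decide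
    by_cases hsmall : a.natAbs < 2
    · have ha1 : a = 1 := by omega
      subst ha1
      have e1 : PySem.Int.floordiv 1 2 = 0 := by decide
      have e2 : PySem.Int.toStr (PySem.Int.mod 1 2) = "1" := by decide
      rw [whitespaceLoopA.eq_def]
      norm_num [e1, e2]
      have e3 : binChars 1 = ['1'] := by rw [binChars]; norm_num
      rw [e3]
      decide
    · have hpos : 0 < PySem.Int.floordiv a 2 := by rw [hd]; omega
      have hlt : (PySem.Int.floordiv a 2).toNat < k := by
        rw [hd]; omega
      rw [ih _ hlt _ hpos _ rfl]
      have hnat : (PySem.Int.floordiv a 2).natAbs = a.natAbs / 2 := by rw [hd]; omega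
      rw [hnat]
      conv_rhs => rw [binChars, dif_neg (by omega)]
      rw [String.toList_append, hdig]
      simp

-- A side: the two replace passes turn binChars into wsBits
theorem binChars_replaced (m : Nat) :
    (binChars m).map ((fun c => if c = '1' then '\t' else c) ∘ (fun c => if c = '0' then ' ' else c))
      = wsBits m := by
  fun_induction binChars m with
  | case1 m h =>
    rw [wsBits, if_pos h]
    interval_cases m <;> decide
  | case2 m h ih =>
    rw [wsBits, if_neg (by omega), List.map_append, ih]
    congr 1
    have h2 : m % 2 < 2 := Nat.mod_lt _ (by norm_num)
    interval_cases hq : (m % 2) <;> decide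

theorem pyBitLength_pos (m : Nat) (h : 1 ≤ m) : 1 ≤ pyBitLength m := by
  rw [pyBitLength, if_neg (by omega)]; omega

-- B side: the MSB-first bit scan produces wsBits
theorem scan_eq_wsBits (m : Nat) (hm : 1 ≤ m) :
    (List.range (pyBitLength m)).map
        (fun k => if (m >>> (pyBitLength m - 1 - k)) % 2 = 1 then '\t' else ' ')
      = wsBits m := by
  induction m using Nat.strong_induction_on with
  | _ m ih =>
    by_cases hsmall : m < 2
    · have : m = 1 := by omega
      subst this
      have h0 : pyBitLength 0 = 0 := by rw [pyBitLength]; simp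
      have h1 : pyBitLength 1 = 1 := by rw [pyBitLength]; norm_num [h0]
      have hws : wsBits 1 = ['\t'] := by rw [wsBits]; norm_num
      rw [h1, hws]
      decide
    · have hq : 1 ≤ m / 2 := by omega
      have hw' := pyBitLength_pos (m / 2) hq
      have hw : pyBitLength m = pyBitLength (m / 2) + 1 := by
        rw [pyBitLength, if_neg (by omega)]
      set w' := pyBitLength (m / 2) with hw'def
      rw [hw, List.range_succ, List.map_append, wsBits, if_neg (by omega)]
      congr 1
      · rw [← ih (m / 2) (by omega) hq]
        apply List.map_congr_left
        intro k hk
        rw [List.mem_range] at hk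
        have hsh : m >>> (w' + 1 - 1 - k) = (m / 2) >>> (w' - 1 - k) := by
          have h1 : w' + 1 - 1 - k = (w' - 1 - k) + 1 := by omega
          rw [h1, Nat.shiftRight_eq_div_pow, Nat.shiftRight_eq_div_pow,
            pow_succ, mul_comm, ← Nat.div_div_eq_div_mul]
        rw [hsh]
      · simp [Nat.shiftRight_eq_div_pow]

-- ===== VERDICT (by name: the statement is the Claim_ definition above) =====
theorem whitespace_number_spec : Claim_equal_whitespace_number := by
  intro n _
  show whitespace_number n = whitespace_number_alt n
  by_cases h0 : n = 0
  · subst h0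
    have h0 : pyBitLength 0 = 0 := by rw [pyBitLength]; simp
    simp only [whitespace_number, whitespace_number_alt, Int.natAbs_zero, h0]
    decide
  · simp only [whitespace_number, whitespace_number_alt]
    have habs : |n| ≠ 0 := by simpa using h0
    rw [if_pos habs]
    have hm : 1 ≤ n.natAbs := by omega
    have hwpos := pyBitLength_pos n.natAbs hm
    have hmax : max (pyBitLength n.natAbs) 1 = pyBitLength n.natAbs := by omega
    rw [hmax, ← String.toList_inj]
    simp only [String.toList_append, PySem.Str.toList_replace, String.toList_ofList]
    have hl : (whitespaceLoopA |n| "").toList = binChars n.natAbs := by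
      rw [whitespaceLoopA_eq |n| (abs_pos.mpr h0) ""]
      simp [Int.natAbs_abs]
    have h0c : ("0" : String).toList = ['0'] := by decide
    have h1c : ("1" : String).toList = ['1'] := by decide
    have hsp : (" " : String).toList = [' '] := by decide
    have htb : ("\t" : String).toList = ['\t'] := by decide
    rw [hl, h0c, h1c, hsp, htb, replace_single, replace_single, List.map_map,
      binChars_replaced]
    congr 1
    congr 1
    rw [← scan_eq_wsBits n.natAbs hm, PySem.List.pyRange_neg_one, List.map_map]
    have hlen : ((pyBitLength n.natAbs : Int) - 1 - (-1)).toNat = pyBitLength n.natAbs := by omega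
    rw [hlen]
    apply List.map_congr_left
    intro k hk
    rw [List.mem_range] at hk
    have : ((pyBitLength n.natAbs : Int) - 1 - (k : Nat)).toNat = pyBitLength n.natAbs - 1 - k := by
      omega
    simp only [Function.comp, this]
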